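-- pv_equiv track=rewrite | github.com/mherkazandjian/har | src/har_bagit.py | distribute_files
-- ===== SOURCE A (Python) =====
-- def distribute_files(sized_entries, n_splits):
--     """Bin-pack file entries into n_splits balanced groups.
--
--     sized_entries: list of (abs_path, rel_path, size)
--     Returns list of n_splits lists, each containing (abs_path, rel_path, size).
--     Uses first-fit-decreasing by file size.
--     """
--     import heapq
--     if n_splits <= 1:
--         return [sized_entries]
--     # Sort by size descending
--     sorted_items = sorted(sized_entries, key=lambda x: x[2], reverse=True)
--     # Min-heap of (current_total_size, split_index)
--     heap = [(0, i) for i in range(n_splits)]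
--     heapq.heapify(heap)
--     assignments = [[] for _ in range(n_splits)]
--     for entry in sorted_items:
--         total, idx = heapq.heappop(heap)
--         assignments[idx].append(entry)
--         heapq.heappush(heap, (total + entry[2], idx))
--     return assignments
-- ===== SOURCE B (Python) =====
-- def distribute_files(sized_entries, n_splits):
--     """Bin-pack file entries into n_splits balanced groups.
--
--     Same result as the heap version: greedy longest-processing-time with the
--     lowest-index bin winning ties, using a plain totals list instead of a heap.
--     """
--     if n_splits <= 1:
--         return [sized_entries]
--     totals = [0] * n_splits
--     assignments = [[] for _ in range(n_splits)]
--     for entry in sorted(sized_entries, key=lambda x: x[2], reverse=True):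
--         idx = totals.index(min(totals))
--         assignments[idx].append(entry)
--         totals[idx] += entry[2]
--     return assignments
-- ===== Notes on version B (the rewrite author's own statement) =====
-- stated objective: simpler
-- what changed: Replaces the heapq min-heap of (total, index) pairs with a plain totals list: the target bin is totals.index(min(totals)) (first occurrence = lowest index among ties, exactly the heap's lexicographic tie-break), then the total is bumped in place.
import Mathlib
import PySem

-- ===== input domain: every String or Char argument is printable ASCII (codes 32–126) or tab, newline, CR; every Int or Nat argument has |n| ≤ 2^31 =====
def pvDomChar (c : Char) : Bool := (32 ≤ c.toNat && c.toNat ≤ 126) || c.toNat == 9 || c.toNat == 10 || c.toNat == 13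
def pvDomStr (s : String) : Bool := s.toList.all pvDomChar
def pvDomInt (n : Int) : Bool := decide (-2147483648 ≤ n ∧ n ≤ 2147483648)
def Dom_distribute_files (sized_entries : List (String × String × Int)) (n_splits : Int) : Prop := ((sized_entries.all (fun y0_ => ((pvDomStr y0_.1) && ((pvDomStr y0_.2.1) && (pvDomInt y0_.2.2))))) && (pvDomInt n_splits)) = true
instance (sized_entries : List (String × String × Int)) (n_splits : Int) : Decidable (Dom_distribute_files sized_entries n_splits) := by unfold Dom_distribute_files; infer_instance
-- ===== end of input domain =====

-- B replaces the heapq min-heap of (total, index) pairs with a plain totals list and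
-- totals.index(min(totals)); same return value, simpler code (objective: simpler, no speed claim).

-- ===== PORT A =====
-- Python tuple comparison (total, idx) <= (total', idx'): lexicographic on ints (exact).
def pvPle (a b : Int × Int) : Bool := a.1 < b.1 || (a.1 == b.1 && a.2 ≤ b.2)

-- heapq model: heapq.heappop pops the least item of the heap (tuple order above) and
-- heapq.heappush adds one; the heap's internal array layout is never observable through
-- the popped values here (the order is total and every heap item carries a distinct idx),
-- so the port maintains the multiset of heap items and pops its lexicographic minimum —
-- exact for this program.
def pvPopMin : List (Int × Int) → (Int × Int) × List (Int × Int)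
  | [] => ((0, 0), [])
  | x :: xs =>
    let m := xs.foldl (fun acc y => if pvPle acc y then acc else y) x
    (m, (x :: xs).erase m)

-- assignments[idx].append(entry); exact for 0 ≤ idx < len assignments (always the case here)
def pvAppendAt (asg : List (List (String × String × Int))) (j : Nat)
    (e : String × String × Int) : List (List (String × String × Int)) :=
  asg.set j ((asg.getD j []) ++ [e])

-- the 'for entry in sorted_items' loop of A, state = (heap, assignments)
def pvLoopA : List (String × String × Int) → List (Int × Int) →
    List (List (String × String × Int)) → List (List (String × String × Int))
  | [], _, asg => asg
  | e :: rest, heap, asg =>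
    let p := pvPopMin heap
    pvLoopA rest (p.2 ++ [(p.1.1 + e.2.2, p.1.2)]) (pvAppendAt asg p.1.2.toNat e)

def distribute_files (sized_entries : List (String × String × Int)) (n_splits : Int) :
    List (List (String × String × Int)) :=
  if n_splits ≤ 1 then [sized_entries]
  else
    let sorted_items := PySem.List.sorted sized_entries (fun x => x.2.2) true
    let heap := (PySem.List.pyRange 0 n_splits 1).map (fun i => ((0 : Int), i))
    pvLoopA sorted_items heap (List.replicate n_splits.toNat [])

-- ===== PORT B =====
-- the 'for entry in ...' loop of B, state = (totals, assignments)
def pvLoopB : List (String × String × Int) → List Int →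
    List (List (String × String × Int)) → List (List (String × String × Int))
  | [], _, asg => asg
  | e :: rest, totals, asg =>
    let m := (PySem.List.min? totals (fun x => x)).getD 0
    let j := (PySem.List.index? totals m).getD 0
    pvLoopB rest (totals.set j (m + e.2.2)) (pvAppendAt asg j e)

def distribute_files_alt (sized_entries : List (String × String × Int)) (n_splits : Int) :
    List (List (String × String × Int)) :=
  if n_splits ≤ 1 then [sized_entries]
  else
    pvLoopB (PySem.List.sorted sized_entries (fun x => x.2.2) true)
      (List.replicate n_splits.toNat 0) (List.replicate n_splits.toNat [])

-- ===== PRECONDITION & SPEC =====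
def Spec_distribute_files (sized_entries : List (String × String × Int)) (n_splits : Int) (out : List (List (String × String × Int))) : Prop := out = distribute_files_alt sized_entries n_splits
instance (sized_entries : List (String × String × Int)) (n_splits : Int) (out : List (List (String × String × Int))) : Decidable (Spec_distribute_files sized_entries n_splits out) := by unfold Spec_distribute_files; infer_instance

-- ===== CLAIM (what is proved, stated in full; the proofs are below) =====
def Claim_equal_distribute_files : Prop := ∀ (sized_entries : List (String × String × Int)) (n_splits : Int), Dom_distribute_files sized_entries n_splits → Spec_distribute_files sized_entries n_splits (distribute_files sized_entries n_splits)

-- ===== LEMMAS AND PROOFS =====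

-- totals list viewed as the set of heap items (total, idx), idx as a Python int
def ztotals (totals : List Int) : List (Int × Int) :=
  totals.zipIdx.map (fun p => (p.1, (p.2 : Int)))

lemma ztotals_length (totals : List Int) : (ztotals totals).length = totals.length := by
  simp [ztotals]

lemma ztotals_getElem (totals : List Int) (k : Nat) (hk : k < totals.length) :
    (ztotals totals)[k]'(by simpa [ztotals_length] using hk) = (totals[k], (k : Int)) := by
  simp [ztotals]

lemma mem_ztotals {totals : List Int} {p : Int × Int} :
    p ∈ ztotals totals ↔ ∃ k : Nat, ∃ hk : k < totals.length, p = (totals[k], (k : Int)) := by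
  constructor
  · intro hp
    rcases List.getElem_of_mem hp with ⟨k, hk, he⟩
    exact ⟨k, by simpa [ztotals_length] using hk, by rw [← he, ztotals_getElem]⟩
  · rintro ⟨k, hk, rfl⟩
    have := ztotals_getElem totals k hk
    exact this ▸ List.getElem_mem _

lemma pvPle_total (a b : Int × Int) : pvPle a b = true ∨ pvPle b a = true := by
  simp only [pvPle, Bool.or_eq_true, Bool.and_eq_true, decide_eq_true_eq, beq_iff_eq]
  omega

lemma pvPle_trans {a b c : Int × Int} (h1 : pvPle a b = true) (h2 : pvPle b c = true) :
    pvPle a c = true := by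
  simp only [pvPle, Bool.or_eq_true, Bool.and_eq_true, decide_eq_true_eq, beq_iff_eq] at *
  omega

-- the fold in pvPopMin: membership and minimality
lemma foldMin_mem (x : Int × Int) (xs : List (Int × Int)) :
    xs.foldl (fun acc y => if pvPle acc y then acc else y) x ∈ x :: xs := by
  induction xs generalizing x with
  | nil => simp
  | cons y ys ih =>
    simp only [List.foldl_cons]
    rcases List.mem_cons.1 (ih (if pvPle x y then x else y)) with h | h
    · rw [h]; split_ifs <;> simp
    · simp [h]

lemma foldMin_le (x : Int × Int) (xs : List (Int × Int)) :
    ∀ z ∈ x :: xs, pvPle (xs.foldl (fun acc y => if pvPle acc y then acc else y) x) z = true := by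
  induction xs generalizing x with
  | nil =>
    intro z hz
    have : z = x := by simpa using hz
    subst this
    simp [pvPle]
  | cons y ys ih =>
    intro z hz
    simp only [List.foldl_cons]
    have ihw := ih (if pvPle x y then x else y)
    have hfw : pvPle (ys.foldl (fun acc y => if pvPle acc y then acc else y)
        (if pvPle x y then x else y)) (if pvPle x y then x else y) = true :=
      ihw _ (.head _)
    rcases List.mem_cons.1 hz with rfl | hz'
    · by_cases hxy : pvPle z y = true
      · simpa [hxy] using hfw
      · have hyx : pvPle y z = true := (pvPle_total z y).resolve_left (by simp [hxy])
        rw [if_neg hxy] at hfw ⊢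
        exact pvPle_trans hfw hyx
    · rcases List.mem_cons.1 hz' with rfl | hz'' 
      · by_cases hxy : pvPle x z = true
        · rw [if_pos hxy] at hfw ⊢
          exact pvPle_trans hfw hxy
        · simpa [hxy] using hfw
      · exact ihw z (List.mem_cons_of_mem _ hz'')

-- if z is in the list and strictly below every other element, the fold returns z
lemma foldMin_eq (x : Int × Int) (xs : List (Int × Int)) (z : Int × Int)
    (hz : z ∈ x :: xs) (hmin : ∀ y ∈ x :: xs, y ≠ z → pvPle y z = false) :
    xs.foldl (fun acc y => if pvPle acc y then acc else y) x = z := by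
  set w := xs.foldl (fun acc y => if pvPle acc y then acc else y) x with hw
  by_cases hwz : w = z
  · exact hwz
  · have h1 : pvPle w z = true := foldMin_le x xs z hz
    have h2 : pvPle w z = false := hmin w (foldMin_mem x xs) hwz
    rw [h1] at h2; exact absurd h2 (by simp)

-- set at j is a permutation of (erase the j-th) ++ [new]
lemma set_perm_eraseIdx {α : Type} (l : List α) (j : Nat) (b : α) (hj : j < l.length) :
    (l.set j b).Perm (l.eraseIdx j ++ [b]) := by
  induction l generalizing j with
  | nil => simp at hj
  | cons a t ih =>
    cases j with
    | zero =>
      simp only [List.set, List.eraseIdx]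
      exact List.perm_cons_append_cons b (by simp)
    | succ k =>
      simp only [List.set, List.eraseIdx, List.cons_append]
      exact (ih k (by simpa using hj)).cons a

-- erase removes the first occurrence: with nothing equal before position j, it is eraseIdx j
lemma erase_eq_eraseIdx_of_first {α : Type} [BEq α] [LawfulBEq α] (l : List α) (j : Nat) (a : α)
    (hj : j < l.length) (ha : l[j] = a) (hbefore : ∀ k (hk : k < j), l[k]'(by omega) ≠ a) :
    l.erase a = l.eraseIdx j := by
  induction l generalizing j with
  | nil => simp at hj
  | cons x t ih =>
    cases j with
    | zero =>
      simp only [List.getElem_cons_zero] at ha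
      subst ha
      simp [List.erase_cons_head]
    | succ k =>
      have hx : x ≠ a := by
        have := hbefore 0 (by omega)
        simpa using this
      rw [List.erase_cons_tail (by simpa using hx), List.eraseIdx_cons_succ]
      congr 1
      exact ih k (by simpa using hj) (by simpa using ha)
        (fun m hm => by
          have := hbefore (m + 1) (by omega)
          simpa using this)

-- erase of (m, j) in ztotals removes exactly position j
lemma ztotals_erase (totals : List Int) (j : Nat) (hj : j < totals.length) :
    (ztotals totals).erase (totals[j], (j : Int)) = (ztotals totals).eraseIdx j := by
  have hjz : j < (ztotals totals).length := by simpa [ztotals_length] using hj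
  apply erase_eq_eraseIdx_of_first _ j _ hjz (ztotals_getElem totals j hj)
  intro k hk
  rw [ztotals_getElem totals k (by omega)]
  intro h
  have : (k : Int) = (j : Int) := congrArg Prod.snd h
  omega

-- zipIdx of a set
lemma ztotals_set (totals : List Int) (j : Nat) (v : Int) (_hj : j < totals.length) :
    ztotals (totals.set j v) = (ztotals totals).set j (v, (j : Int)) := by
  apply List.ext_getElem
  · simp [ztotals_length]
  · intro k h1 h2
    have hk : k < totals.length := by
      simpa [ztotals_length] using h2
    rw [ztotals_getElem _ k (by simpa using hk)]
    simp only [List.getElem_set]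
    by_cases h : j = k
    · subst h; simp
    · simp [h, ztotals_getElem totals k hk]

-- main loop equivalence: the heap is always (a permutation of) the totals list with indices
lemma loop_eq (items : List (String × String × Int)) (totals : List Int)
    (heap : List (Int × Int)) (asg : List (List (String × String × Int)))
    (hp : heap.Perm (ztotals totals)) (hne : totals ≠ []) :
    pvLoopA items heap asg = pvLoopB items totals asg := by
  induction items generalizing totals heap asg with
  | nil => simp [pvLoopA, pvLoopB]
  | cons e rest ih =>
    obtain ⟨m, hm⟩ : ∃ m, PySem.List.min? totals (fun x => x) = some m := by
      rcases h : PySem.List.min? totals (fun x => x) with _ | m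
      · exact absurd ((PySem.List.min?_eq_none_iff _ _).1 h) hne
      · exact ⟨m, rfl⟩
    have hmem : m ∈ totals := PySem.List.min?_mem hm
    have hmle : ∀ y ∈ totals, m ≤ y := PySem.List.min?_isMin hm
    obtain ⟨j, hj⟩ : ∃ j, PySem.List.index? totals m = some j := by
      rcases h : PySem.List.index? totals m with _ | j
      · rw [PySem.List.index?_eq_none_iff] at h; exact absurd hmem h
      · exact ⟨j, rfl⟩
    obtain ⟨hjlt, hjval, hjfirst⟩ := PySem.List.getElem_of_index?_eq_some hj
    -- (m, j) is the strictly least pair of the heap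
    have hmemz : ((m, (j : Int)) : Int × Int) ∈ ztotals totals :=
      mem_ztotals.2 ⟨j, hjlt, by rw [hjval]⟩
    have hminz : ∀ y ∈ heap, y ≠ ((m, (j : Int)) : Int × Int) → pvPle y (m, (j : Int)) = false := by
      intro y hy hyne
      obtain ⟨k, hk, rfl⟩ := mem_ztotals.1 (hp.mem_iff.1 hy)
      have h1 : m ≤ totals[k] := hmle _ (List.getElem_mem hk)
      simp only [pvPle, Bool.or_eq_false_iff, Bool.and_eq_false_iff,
        decide_eq_false_iff_not, beq_eq_false_iff_ne, ne_eq]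
      by_cases hkm : totals[k] = m
      · have hkj : k ≠ j := by
          intro h; subst h; exact hyne (by simp [hkm])
        have hkgt : j < k := by
          rcases Nat.lt_or_ge k j with h | h
          · exact absurd hkm (hjfirst k h)
          · omega
        exact ⟨by omega, Or.inr (by omega)⟩
      · exact ⟨by omega, Or.inl hkm⟩
    -- heap is nonempty
    rcases hheap : heap with _ | ⟨x, xs⟩
    · exfalso
      rw [hheap] at hp
      have : ztotals totals = [] := hp.nil_eq.symm
      have := congrArg List.length this
      simp [ztotals_length] at this
      exact hne this
    have hmemh : ((m, (j : Int)) : Int × Int) ∈ x :: xs := by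
      rw [← hheap]; exact hp.mem_iff.2 hmemz
    have hfold : xs.foldl (fun acc y => if pvPle acc y then acc else y) x = (m, (j : Int)) :=
      foldMin_eq x xs _ hmemh (by rw [← hheap]; exact hminz)
    -- unfold one step of both loops
    simp only [pvLoopA, pvLoopB, pvPopMin, hm, hj, Option.getD_some, hfold]
    rw [← hheap]
    have herase : (heap.erase ((m, (j : Int)) : Int × Int)).Perm
        ((ztotals totals).eraseIdx j) := by
      rw [← ztotals_erase totals j hjlt, ← hjval]
      exact hp.erase _
    have hperm2 : (heap.erase ((m, (j : Int)) : Int × Int) ++ [(m + e.2.2, (j : Int))]).Perm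
        (ztotals (totals.set j (m + e.2.2))) := by
      refine List.Perm.trans (herase.append_right _) ?_
      rw [ztotals_set totals j _ hjlt]
      exact (set_perm_eraseIdx (ztotals totals) j _ (by simpa [ztotals_length] using hjlt)).symm
    have := ih (totals.set j (m + e.2.2)) (heap.erase (m, (j : Int)) ++ [(m + e.2.2, (j : Int))])
      (pvAppendAt asg (j : Int).toNat e) hperm2
      (by intro h; have := congrArg List.length h; simp at this; exact hne (by
            cases totals <;> simp_all))
    simpa [Int.toNat_natCast] using this

-- ===== VERDICT (by name: the statement is the Claim_ definition above) =====
theorem distribute_files_spec : Claim_equal_distribute_files := by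
  intro se n _
  unfold Spec_distribute_files distribute_files distribute_files_alt
  by_cases h : n ≤ 1
  · simp [h]
  · simp only [h, if_false]
    apply loop_eq
    · -- initial heap IS ztotals (replicate n.toNat 0)
      have : ((PySem.List.pyRange 0 n 1).map (fun i => ((0 : Int), i))) =
          ztotals (List.replicate n.toNat 0) := by
        apply List.ext_getElem
        · simp [ztotals_length, PySem.List.length_pyRange_one]
        · intro k h1 h2
          have hk : k < n.toNat := by simpa [ztotals_length] using h2
          rw [ztotals_getElem _ k (by simpa using hk)]
          simp [PySem.List.getElem_pyRange_one]
      rw [this]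
    · -- replicate n.toNat 0 ≠ [] since 2 ≤ n
      have : n.toNat ≠ 0 := by omega
      simp [List.replicate_eq_nil_iff, this]
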